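-- pv_equiv track=rewrite | github.com/DivineJK/MyPythonLibrary | Sequence/EnumerateIncreaseSequence.py | enumerateIncreaseSequence
-- ===== SOURCE A (Python) =====
-- def enumerateIncreaseSequence(n, minNum, maxNum, leastInc):
--     if n <= 0 or minNum > maxNum or minNum + (n - 1) * leastInc > maxNum:
--         return []
--     inc = leastInc
--     if inc < 0:
--         inc = 0
--     lim = maxNum - (n - 1) * inc
--     cur = [minNum + i * inc for i in range(n)]
--     res = []
--     while cur[0] <= lim:
--         res.append([i for i in cur])
--         pnt = n - 1
--         while cur[pnt] + inc * (n - 1 - pnt) >= maxNum: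
--             pnt -= 1
--             if pnt < 0:
--                 return res
--         cur[pnt] += 1
--         for i in range(pnt+1, n):
--             cur[i] = cur[i-1] + inc
-- ===== SOURCE B (Python) =====
-- def enumerateIncreaseSequence(n, minNum, maxNum, leastInc):
--     if n <= 0 or minNum > maxNum or minNum + (n - 1) * leastInc > maxNum:
--         return []
--     inc = max(leastInc, 0)
--
--     def rec(i, lo):
--         if i == n:
--             return [[]]
--         hi = maxNum - inc * (n - 1 - i)
--         return [[v] + rest for v in range(lo, hi + 1) for rest in rec(i + 1, v + inc)]
--
--     return rec(0, minNum)
-- ===== Notes on version B (the rewrite author's own statement) =====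
-- stated objective: alternative
-- what changed: Replaces the iterative odometer (a mutable current list advanced by a backtracking pointer and in-place tail refills) with pure recursive backtracking that, for each position, ranges over the admissible values and concatenates the recursively built suffixes.
import Mathlib
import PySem

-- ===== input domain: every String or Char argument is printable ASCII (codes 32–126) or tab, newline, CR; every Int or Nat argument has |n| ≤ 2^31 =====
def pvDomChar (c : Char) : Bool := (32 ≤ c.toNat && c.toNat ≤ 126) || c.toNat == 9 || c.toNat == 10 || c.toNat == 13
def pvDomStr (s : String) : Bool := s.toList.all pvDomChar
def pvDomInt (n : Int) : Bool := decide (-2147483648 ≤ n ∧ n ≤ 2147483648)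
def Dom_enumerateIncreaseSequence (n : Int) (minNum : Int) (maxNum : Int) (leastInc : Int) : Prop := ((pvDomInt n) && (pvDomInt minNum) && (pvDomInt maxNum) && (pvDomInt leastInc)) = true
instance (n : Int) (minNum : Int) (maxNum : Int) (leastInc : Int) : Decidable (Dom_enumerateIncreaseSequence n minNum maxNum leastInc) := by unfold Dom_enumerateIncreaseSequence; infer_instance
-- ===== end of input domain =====

-- B replaces A's iterative odometer (mutable list + backtracking pointer) by pure recursive
-- backtracking over positions; same return value, no side effects in either (A mutates only locals).

-- ===== PORT A =====
-- inner 'while cur[pnt] + inc*(n-1-pnt) >= maxNum: pnt -= 1; if pnt < 0: return res' —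
-- structural descent on pnt; 'cur[pnt]' is ported as getD (the index is always in range in A's
-- reachable states, exactly where Python does not raise)
def aFindPnt (cur : List Int) (inc maxNum n : Int) : Nat → Option Nat
  | 0 => if maxNum ≤ cur.getD 0 0 + inc * (n - 1) then none else some 0
  | q + 1 =>
    if maxNum ≤ cur.getD (q + 1) 0 + inc * (n - 1 - ((q : Int) + 1)) then
      aFindPnt cur inc maxNum n q
    else some (q + 1)

-- 'cur[pnt] += 1' then 'for i in range(pnt+1, n): cur[i] = cur[i-1] + inc' (indices nonnegative here)
def aRebuild (cur : List Int) (inc n : Int) (p : Nat) : List Int :=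
  (PySem.List.pyRange ((p : Int) + 1) n 1).foldl
    (fun c i => c.set i.toNat (c.getD (i.toNat - 1) 0 + inc))
    (cur.set p (cur.getD p 0 + 1))

-- the outer 'while cur[0] <= lim' loop; fuel is a totality guard only (never exhausted for the
-- fuel chosen in enumerateIncreaseSequence; proved via the measure 'mu' below)
def aLoop (inc maxNum lim n : Int) : Nat → List Int → List (List Int) → List (List Int)
  | 0, _, res => res
  | fuel + 1, cur, res =>
    if cur.headD 0 ≤ lim then
      match aFindPnt cur inc maxNum n ((n - 1).toNat) with
      | none => res ++ [cur]
      | some p => aLoop inc maxNum lim n fuel (aRebuild cur inc n p) (res ++ [cur])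
    else res

def enumerateIncreaseSequence (n : Int) (minNum : Int) (maxNum : Int) (leastInc : Int) : List (List Int) :=
  if n ≤ 0 ∨ maxNum < minNum ∨ maxNum < minNum + (n - 1) * leastInc then []
  else
    let inc := if leastInc < 0 then 0 else leastInc
    let lim := maxNum - (n - 1) * inc
    let cur := (PySem.List.pyRange 0 n 1).map (fun i => minNum + i * inc)
    aLoop inc maxNum lim n (((maxNum - minNum + 1).toNat + 1) ^ n.toNat) cur []

-- ===== PORT B =====
-- rec(i, lo) of Source B, re-indexed by k = n - i (remaining positions); hi = maxNum - inc*(n-1-i) = maxNum - inc*(k-1)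
def bRec (maxNum inc : Int) : Nat → Int → List (List Int)
  | 0, _ => [[]]
  | k + 1, lo =>
    (PySem.List.pyRange lo (maxNum - inc * (k : Int) + 1) 1).flatMap
      (fun v => (bRec maxNum inc k (v + inc)).map (fun rest => v :: rest))

def enumerateIncreaseSequence_alt (n : Int) (minNum : Int) (maxNum : Int) (leastInc : Int) : List (List Int) :=
  if n ≤ 0 ∨ maxNum < minNum ∨ maxNum < minNum + (n - 1) * leastInc then []
  else bRec maxNum (max leastInc 0) n.toNat minNum

-- ===== PRECONDITION & SPEC =====
def Spec_enumerateIncreaseSequence (n : Int) (minNum : Int) (maxNum : Int) (leastInc : Int) (out : List (List Int)) : Prop := out = enumerateIncreaseSequence_alt n minNum maxNum leastInc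
instance (n : Int) (minNum : Int) (maxNum : Int) (leastInc : Int) (out : List (List Int)) : Decidable (Spec_enumerateIncreaseSequence n minNum maxNum leastInc out) := by unfold Spec_enumerateIncreaseSequence; infer_instance

-- ===== CLAIM (what is proved, stated in full; the proofs are below) =====
def Claim_equal_enumerateIncreaseSequence : Prop := ∀ (n : Int) (minNum : Int) (maxNum : Int) (leastInc : Int), Dom_enumerateIncreaseSequence n minNum maxNum leastInc → Spec_enumerateIncreaseSequence n minNum maxNum leastInc (enumerateIncreaseSequence n minNum maxNum leastInc)

-- ===== LEMMAS AND PROOFS =====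

-- the minimal completion [lo, lo+inc, lo+2*inc, ...] of length k
def minList (inc : Int) : Nat → Int → List Int
  | 0, _ => []
  | k + 1, lo => lo :: minList inc k (lo + inc)

-- all admissible sequences lexicographically ≥ cur, in lexicographic order
def EE (maxNum inc : Int) : List Int → List (List Int)
  | [] => [[]]
  | c :: rest =>
      ((EE maxNum inc rest).map (fun t => c :: t)) ++
      (PySem.List.pyRange (c + 1) (maxNum - inc * (rest.length : Int) + 1) 1).flatMap
        (fun v => (bRec maxNum inc rest.length (v + inc)).map (fun t => v :: t))

-- every position is at its upper bound
def Maxed (maxNum inc : Int) : List Int → Prop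
  | [] => True
  | c :: rest => maxNum ≤ c + inc * (rest.length : Int) ∧ Maxed maxNum inc rest

-- coordinate bounds invariant of A's loop state
def Bnd (maxNum inc : Int) : Int → List Int → Prop
  | _, [] => True
  | lo, c :: rest => lo ≤ c ∧ c ≤ maxNum - inc * (rest.length : Int) ∧ Bnd maxNum inc (lo + inc) rest

-- termination measure for A's loop: the state read as a base-B numeral of 'distances to the top'
def mu (maxNum inc : Int) (B : Nat) : List Int → Nat
  | [] => 0
  | c :: rest => (maxNum - inc * (rest.length : Int) - c).toNat * B ^ rest.length + mu maxNum inc B rest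

theorem minList_length (inc : Int) (k : Nat) (lo : Int) : (minList inc k lo).length = k := by
  induction k generalizing lo with
  | zero => rfl
  | succ k ih => simp [minList, ih]

theorem bnd_mono (maxNum inc : Int) (l : List Int) : ∀ lo lo', Bnd maxNum inc lo' l → lo ≤ lo' → Bnd maxNum inc lo l := by
  induction l with
  | nil => intro lo lo' _ _; trivial
  | cons c rest ih =>
    intro lo lo' h hle
    exact ⟨le_trans hle h.1, h.2.1, ih _ _ h.2.2 (by omega)⟩

theorem bnd_minList (maxNum inc : Int) (k : Nat) : ∀ lo, lo ≤ maxNum - inc * ((k : Int) - 1) → Bnd maxNum inc lo (minList inc k lo) := by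
  induction k with
  | zero => intro lo _; trivial
  | succ k ih =>
    intro lo h
    refine ⟨le_refl _, ?_, ?_⟩
    · rw [minList_length]; push_cast at h ⊢; nlinarith [h]
    · exact ih (lo + inc) (by push_cast at h ⊢; nlinarith [h])

theorem EE_minList (maxNum inc : Int) (k : Nat) : ∀ lo, lo ≤ maxNum - inc * ((k : Int) - 1) → EE maxNum inc (minList inc k lo) = bRec maxNum inc k lo := by
  induction k with
  | zero => intro lo _; rfl
  | succ k ih =>
    intro lo h
    have hfeas : lo + inc ≤ maxNum - inc * ((k : Int) - 1) := by push_cast at h ⊢; nlinarith [h]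
    have hlt : lo < maxNum - inc * (k : Int) + 1 := by
      have h' := h; push_cast at h'; ring_nf at h' ⊢; linarith
    show ((EE maxNum inc (minList inc k (lo + inc))).map _) ++ _ = _
    rw [ih _ hfeas]
    show _ ++ (PySem.List.pyRange (lo + 1) (maxNum - inc * ((minList inc k (lo + inc)).length : Int) + 1) 1).flatMap _ = bRec maxNum inc (k + 1) lo
    rw [minList_length, bRec, PySem.List.pyRange_one_cons hlt, List.flatMap_cons]

theorem EE_maxed (maxNum inc : Int) (cur : List Int) (h : Maxed maxNum inc cur) : EE maxNum inc cur = [cur] := by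
  induction cur with
  | nil => rfl
  | cons c rest ih =>
    obtain ⟨h1, h2⟩ := h
    show ((EE maxNum inc rest).map _) ++ (PySem.List.pyRange (c + 1) (maxNum - inc * (rest.length : Int) + 1) 1).flatMap _ = _
    rw [ih h2, PySem.List.pyRange_one_eq_nil (by omega)]
    simp

theorem EE_step (maxNum inc : Int) (c : Int) (tail : List Int)
    (hc : c + inc * (tail.length : Int) < maxNum) (ht : Maxed maxNum inc tail) :
    ∀ pre : List Int, EE maxNum inc (pre ++ c :: tail)
      = (pre ++ c :: tail) :: EE maxNum inc (pre ++ (c + 1) :: minList inc tail.length (c + 1 + inc)) := by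
  intro pre
  induction pre with
  | nil =>
    have hfeas : c + 1 + inc ≤ maxNum - inc * ((tail.length : Int) - 1) := by
      have e : inc * ((tail.length : Int) - 1) = inc * (tail.length : Int) - inc := by ring
      linarith [e, hc]
    simp only [List.nil_append, EE, minList_length]
    rw [EE_maxed _ _ _ ht, EE_minList _ _ _ _ hfeas,
      PySem.List.pyRange_one_cons (show c + 1 < maxNum - inc * (tail.length : Int) + 1 by linarith),
      List.flatMap_cons]
    simp
  | cons a pre' ih =>
    simp only [List.cons_append, EE, ih, List.map_cons, List.length_append, List.length_cons,
      minList_length, List.cons_append]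

theorem bnd_step (maxNum inc : Int) (c : Int) (tail : List Int)
    (hc : c + inc * (tail.length : Int) < maxNum) :
    ∀ (pre : List Int) (lo : Int), Bnd maxNum inc lo (pre ++ c :: tail) →
      Bnd maxNum inc lo (pre ++ (c + 1) :: minList inc tail.length (c + 1 + inc)) := by
  intro pre
  induction pre with
  | nil =>
    intro lo h
    obtain ⟨h1, h2, _⟩ := h
    refine ⟨by omega, ?_, ?_⟩
    · rw [minList_length]; omega
    · refine bnd_mono _ _ _ _ _ (bnd_minList maxNum inc tail.length (c + 1 + inc) ?_) (by omega)
      have e : inc * ((tail.length : Int) - 1) = inc * (tail.length : Int) - inc := by ring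
      linarith [e, hc]
  | cons a pre' ih =>
    intro lo h
    refine ⟨h.1, ?_, ih _ h.2.2⟩
    have := h.2.1
    simp only [List.append_eq, List.length_append, List.length_cons, minList_length] at this ⊢
    exact this

theorem mu_lt (maxNum inc : Int) (B : Nat) (cur : List Int) :
    ∀ lo, Bnd maxNum inc lo cur → maxNum - inc * ((cur.length : Int) - 1) - lo < (B : Int) →
      mu maxNum inc B cur < B ^ cur.length := by
  induction cur with
  | nil => intro lo _ _; simp [mu]
  | cons c rest ih =>
    intro lo h hB
    obtain ⟨h1, h2, h3⟩ := h
    have hlen : ((c :: rest).length : Int) - 1 = (rest.length : Int) := by simp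
    rw [hlen] at hB
    have hrest : mu maxNum inc B rest < B ^ rest.length := by
      refine ih (lo + inc) h3 ?_
      have e : inc * ((rest.length : Int) - 1) = inc * (rest.length : Int) - inc := by ring
      linarith [e, hB]
    have hd : (maxNum - inc * (rest.length : Int) - c).toNat + 1 ≤ B := by omega
    show (maxNum - inc * (rest.length : Int) - c).toNat * B ^ rest.length + mu maxNum inc B rest
        < B ^ (c :: rest).length
    calc (maxNum - inc * (rest.length : Int) - c).toNat * B ^ rest.length + mu maxNum inc B rest
        < (maxNum - inc * (rest.length : Int) - c).toNat * B ^ rest.length + B ^ rest.length :=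
          Nat.add_lt_add_left hrest _
      _ = ((maxNum - inc * (rest.length : Int) - c).toNat + 1) * B ^ rest.length := by ring
      _ ≤ B * B ^ rest.length := Nat.mul_le_mul_right _ hd
      _ = B ^ (c :: rest).length := by rw [List.length_cons, pow_succ]; ring

theorem mu_dec (maxNum inc : Int) (B : Nat) (c : Int) (tail : List Int)
    (hc : c + inc * (tail.length : Int) < maxNum) :
    ∀ (pre : List Int) (lo : Int), Bnd maxNum inc lo (pre ++ c :: tail) →
      maxNum - inc * (((pre ++ c :: tail).length : Int) - 1) - lo < (B : Int) →
      mu maxNum inc B (pre ++ (c + 1) :: minList inc tail.length (c + 1 + inc)) < mu maxNum inc B (pre ++ c :: tail) := by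
  intro pre
  induction pre with
  | nil =>
    intro lo h hB
    obtain ⟨h1, h2, _⟩ := h
    simp only [List.nil_append, List.length_cons] at hB ⊢
    have hB' : maxNum - inc * (tail.length : Int) - lo < (B : Int) := by
      push_cast at hB
      linarith [hB, (by ring : inc * ((tail.length : Int) + 1 - 1) = inc * (tail.length : Int))]
    have e : inc * ((tail.length : Int) - 1) = inc * (tail.length : Int) - inc := by ring
    have hmin : mu maxNum inc B (minList inc tail.length (c + 1 + inc)) < B ^ tail.length := by
      have := mu_lt maxNum inc B (minList inc tail.length (c + 1 + inc)) (c + 1 + inc)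
        (bnd_minList maxNum inc tail.length (c + 1 + inc) (by linarith [e, hc]))
        (by rw [minList_length]; linarith [e, hB', h1])
      rwa [minList_length] at this
    show (maxNum - inc * ((minList inc tail.length (c + 1 + inc)).length : Int) - (c + 1)).toNat
          * B ^ (minList inc tail.length (c + 1 + inc)).length
        + mu maxNum inc B (minList inc tail.length (c + 1 + inc))
        < (maxNum - inc * (tail.length : Int) - c).toNat * B ^ tail.length + mu maxNum inc B tail
    rw [minList_length]
    have hdd : (maxNum - inc * (tail.length : Int) - (c + 1)).toNat + 1
        = (maxNum - inc * (tail.length : Int) - c).toNat := by omega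
    calc (maxNum - inc * (tail.length : Int) - (c + 1)).toNat * B ^ tail.length
          + mu maxNum inc B (minList inc tail.length (c + 1 + inc))
        < (maxNum - inc * (tail.length : Int) - (c + 1)).toNat * B ^ tail.length + B ^ tail.length :=
          Nat.add_lt_add_left hmin _
      _ = ((maxNum - inc * (tail.length : Int) - (c + 1)).toNat + 1) * B ^ tail.length := by ring
      _ = (maxNum - inc * (tail.length : Int) - c).toNat * B ^ tail.length := by rw [hdd]
      _ ≤ (maxNum - inc * (tail.length : Int) - c).toNat * B ^ tail.length + mu maxNum inc B tail :=
          Nat.le_add_right _ _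
  | cons a pre' ih =>
    intro lo h hB
    simp only [List.cons_append, mu, List.length_append, List.length_cons, minList_length] at hB ⊢
    refine Nat.add_lt_add_left ?_ _
    have hpre : maxNum - inc * (((pre' ++ c :: tail).length : Int) - 1) - (lo + inc) < (B : Int) := by
      simp only [List.length_append, List.length_cons]
      push_cast at hB ⊢
      linarith [hB]
    exact ih (lo + inc) h.2.2 hpre

theorem findPnt_none (cur : List Int) (inc maxNum n : Int) (p : Nat)
    (h : aFindPnt cur inc maxNum n p = none) :
    ∀ q ≤ p, maxNum ≤ cur.getD q 0 + inc * (n - 1 - (q : Int)) := by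
  induction p with
  | zero =>
    intro q hq
    interval_cases q
    unfold aFindPnt at h
    split at h
    · simpa using ‹maxNum ≤ _›
    · exact absurd h (by simp)
  | succ p ih =>
    unfold aFindPnt at h
    split at h
    · intro q hq
      rcases Nat.lt_or_ge q (p + 1) with h1 | h1
      · exact ih h q (by omega)
      · have : q = p + 1 := by omega
        subst this
        simpa using ‹maxNum ≤ _›
    · exact absurd h (by simp)

theorem findPnt_some (cur : List Int) (inc maxNum n : Int) (p q : Nat)
    (h : aFindPnt cur inc maxNum n p = some q) :
    q ≤ p ∧ cur.getD q 0 + inc * (n - 1 - (q : Int)) < maxNum ∧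
      ∀ r, q < r → r ≤ p → maxNum ≤ cur.getD r 0 + inc * (n - 1 - (r : Int)) := by
  induction p with
  | zero =>
    unfold aFindPnt at h
    split at h
    · exact absurd h (by simp)
    · obtain rfl : q = 0 := by simpa using h.symm
      refine ⟨le_refl _, by simpa using not_le.mp ‹¬ maxNum ≤ _›, fun r h1 h2 => by omega⟩
  | succ p ih =>
    unfold aFindPnt at h
    split at h
    · obtain ⟨ih1, ih2, ih3⟩ := ih h
      refine ⟨by omega, ih2, fun r h1 h2 => ?_⟩
      rcases Nat.lt_or_ge r (p + 1) with h3 | h3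
      · exact ih3 r h1 (by omega)
      · have : r = p + 1 := by omega
        subst this
        simpa using ‹maxNum ≤ _›
    · obtain rfl : q = p + 1 := by simpa using h.symm
      exact ⟨le_refl _, by simpa using not_le.mp ‹¬ maxNum ≤ _›, fun r h1 h2 => by omega⟩

theorem maxed_of_getD (maxNum inc : Int) (t : List Int)
    (h : ∀ j, j < t.length → maxNum ≤ t.getD j 0 + inc * ((t.length : Int) - 1 - (j : Int))) :
    Maxed maxNum inc t := by
  induction t with
  | nil => trivial
  | cons c rest ih =>
    constructor
    · have := h 0 (by simp)
      simpa using this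
    · refine ih (fun j hj => ?_)
      have := h (j + 1) (by simp; omega)
      simp only [List.getD_cons_succ, List.length_cons] at this
      push_cast at this
      ring_nf at this ⊢
      linarith [this]

theorem fill_foldl (inc : Int) (m : Nat) : ∀ (c : List Int) (j : Nat), 1 ≤ j → j + m = c.length →
    (PySem.List.pyRange (j : Int) ((c.length : Int)) 1).foldl
      (fun c i => c.set i.toNat (c.getD (i.toNat - 1) 0 + inc)) c
    = c.take j ++ minList inc m (c.getD (j - 1) 0 + inc) := by
  induction m with
  | zero =>
    intro c j hj hlen
    rw [PySem.List.pyRange_one_eq_nil (by omega)]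
    simp [minList, show j = c.length by omega]
  | succ m ih =>
    intro c j hj hlen
    have hjlt : j < c.length := by omega
    rw [PySem.List.pyRange_one_cons (by exact_mod_cast hjlt)]
    rw [List.foldl_cons]
    simp only [Int.toNat_natCast]
    set x := c.getD (j - 1) 0 + inc with hx
    set c' := c.set j x with hc'
    have hlen' : c'.length = c.length := by rw [hc', List.length_set]
    have step : (PySem.List.pyRange ((j : Int) + 1) ((c.length : Int)) 1).foldl
        (fun c i => c.set i.toNat (c.getD (i.toNat - 1) 0 + inc)) c'
        = c'.take (j + 1) ++ minList inc m (c'.getD (j + 1 - 1) 0 + inc) := by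
      have := ih c' (j + 1) (by omega) (by omega)
      rw [hlen'] at this
      push_cast at this ⊢
      exact this
    rw [step]
    have hget : c'.getD (j + 1 - 1) 0 = x := by
      simp only [Nat.add_sub_cancel, hc']
      simp [List.getD_eq_getElem?_getD, hjlt]
    have htake : c'.take (j + 1) = c.take j ++ [x] := by
      rw [hc', List.set_eq_take_append_cons_drop, if_pos hjlt, List.take_append]
      simp [List.length_take, Nat.min_eq_left (Nat.le_of_lt hjlt), List.take_succ_cons]
    rw [hget, htake, minList]
    simp

theorem rebuild_eq (cur : List Int) (inc : Int) (p : Nat) (hp : p < cur.length) :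
    aRebuild cur inc (cur.length : Int) p
      = cur.take p ++ (cur.getD p 0 + 1) :: minList inc (cur.length - p - 1) (cur.getD p 0 + 1 + inc) := by
  unfold aRebuild
  set g := cur.getD p 0 with hg
  set c1 := cur.set p (g + 1) with hc1
  have hlen1 : c1.length = cur.length := by rw [hc1, List.length_set]
  have := fill_foldl inc (cur.length - p - 1) c1 (p + 1) (by omega) (by omega)
  rw [hlen1] at this
  push_cast at this ⊢
  rw [this]
  have hget : c1.getD p 0 = g + 1 := by
    rw [hc1]
    simp [List.getD_eq_getElem?_getD, hp]
  have htake : c1.take (p + 1) = cur.take p ++ [g + 1] := by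
    rw [hc1, List.set_eq_take_append_cons_drop, if_pos hp, List.take_append]
    simp [List.length_take, Nat.min_eq_left (Nat.le_of_lt hp), List.take_succ_cons]
  rw [hget, htake]
  simp

theorem aLoop_eq (maxNum inc lim n : Int) (B : Nat) :
    ∀ (fuel : Nat) (cur : List Int) (res : List (List Int)) (lo : Int),
      0 < cur.length → Bnd maxNum inc lo cur →
      maxNum - inc * ((cur.length : Int) - 1) - lo < (B : Int) →
      mu maxNum inc B cur < fuel →
      lim = maxNum - ((n - 1) * inc) → n = (cur.length : Int) →
      aLoop inc maxNum lim n fuel cur res = res ++ EE maxNum inc cur := by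
  intro fuel
  induction fuel with
  | zero => intro cur res lo _ _ _ hmu _ _; omega
  | succ fuel ih =>
    intro cur res lo hpos hbnd hB hmu hlim hn
    cases cur with
    | nil => simp at hpos
    | cons c rest =>
      have hlimeq : lim = maxNum - inc * (rest.length : Int) := by
        rw [hlim, hn]; simp only [List.length_cons]; push_cast; ring
      have hhead : (c :: rest).headD 0 ≤ lim := by
        rw [hlimeq]; exact hbnd.2.1
      have hidx : (n - 1).toNat = rest.length := by
        rw [hn]; simp only [List.length_cons]; push_cast; omega
      simp only [aLoop, if_pos hhead, hidx]
      rcases heq : aFindPnt (c :: rest) inc maxNum n rest.length with _ | p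
      · have hmax : Maxed maxNum inc (c :: rest) := by
          refine maxed_of_getD _ _ _ (fun j hj => ?_)
          have hj' : j ≤ rest.length := by simpa using Nat.lt_succ_iff.mp (by simpa using hj)
          have := findPnt_none _ _ _ _ _ heq j hj'
          have e : n - 1 - (j : Int) = (((c :: rest).length : Int)) - 1 - j := by rw [hn]
          rw [e] at this
          exact this
        show res ++ [c :: rest] = res ++ EE maxNum inc (c :: rest)
        rw [EE_maxed _ _ _ hmax]
      · obtain ⟨hple, hlt, hmaxr⟩ := findPnt_some _ _ _ _ _ _ heq
        show aLoop inc maxNum lim n fuel (aRebuild (c :: rest) inc n p) (res ++ [c :: rest])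
            = res ++ EE maxNum inc (c :: rest)
        have hplen : p < (c :: rest).length := by simp; omega
        have hdec : c :: rest
            = (c :: rest).take p ++ (c :: rest).getD p 0 :: (c :: rest).drop (p + 1) := by
          conv_lhs => rw [← List.take_append_drop p (c :: rest)]
          rw [List.drop_eq_getElem_cons hplen, List.getD_eq_getElem _ _ hplen]
        have htl : ((c :: rest).drop (p + 1)).length = (c :: rest).length - p - 1 := by
          simp only [List.length_drop, List.length_cons]; omega
        have htlc : ((((c :: rest).drop (p + 1)).length : Nat) : Int)
            = (((c :: rest).length : Int)) - p - 1 := by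
          rw [htl]; simp only [List.length_cons]; omega
        have hc2 : (c :: rest).getD p 0 + inc * ((((c :: rest).drop (p + 1)).length : Nat) : Int)
            < maxNum := by
          rw [htlc]
          have e : n - 1 - (p : Int) = (((c :: rest).length : Int)) - p - 1 := by rw [hn]; ring
          rw [e] at hlt
          exact hlt
        have hmaxtl : Maxed maxNum inc ((c :: rest).drop (p + 1)) := by
          refine maxed_of_getD _ _ _ (fun j hj => ?_)
          have hget : ((c :: rest).drop (p + 1)).getD j 0 = (c :: rest).getD (p + 1 + j) 0 := by
            rw [List.getD_eq_getElem?_getD, List.getElem?_drop, ← List.getD_eq_getElem?_getD]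
          have hr2 : p + 1 + j ≤ rest.length := by
            rw [htl] at hj; simp only [List.length_cons] at hj ⊢; omega
          have := hmaxr (p + 1 + j) (by omega) hr2
          have e : n - 1 - ((p + 1 + j : Nat) : Int)
              = ((((c :: rest).drop (p + 1)).length : Nat) : Int) - 1 - j := by
            rw [hn, htlc]; push_cast; ring
          rw [e] at this
          rw [hget]
          exact this
        have hreb : aRebuild (c :: rest) inc n p
            = (c :: rest).take p ++ ((c :: rest).getD p 0 + 1)
              :: minList inc (((c :: rest).drop (p + 1)).length) ((c :: rest).getD p 0 + 1 + inc) := by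
          rw [hn, rebuild_eq _ inc p hplen, htl]
        set newcur := (c :: rest).take p ++ ((c :: rest).getD p 0 + 1)
            :: minList inc (((c :: rest).drop (p + 1)).length) ((c :: rest).getD p 0 + 1 + inc) with hnew
        have hnewlen : newcur.length = (c :: rest).length := by
          rw [hnew]
          simp only [List.length_append, List.length_cons, minList_length, List.length_take, htl]
          omega
        have hbnd' : Bnd maxNum inc lo newcur := by
          refine bnd_step maxNum inc _ _ hc2 _ lo ?_
          rw [← hdec]; exact hbnd
        have hmu' : mu maxNum inc B newcur < fuel := by
          have hdecmu := mu_dec maxNum inc B _ _ hc2 ((c :: rest).take p) lo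
            (by rw [← hdec]; exact hbnd) (by rw [← hdec]; exact hB)
          rw [← hdec] at hdecmu
          rw [← hnew] at hdecmu
          omega
        have hstep : EE maxNum inc (c :: rest) = (c :: rest) :: EE maxNum inc newcur := by
          conv_lhs => rw [hdec]
          rw [EE_step maxNum inc _ _ hc2 hmaxtl ((c :: rest).take p), ← hdec]
        rw [hreb, ih newcur (res ++ [c :: rest]) lo (by rw [hnewlen]; simp)
          hbnd' (by rw [hnewlen]; exact hB) hmu' hlim (by rw [hnewlen]; exact hn), hstep]
        simp

theorem minList_eq_map_range (inc : Int) (k : Nat) : ∀ lo,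
    (List.range k).map (fun (j : Nat) => lo + (j : Int) * inc) = minList inc k lo := by
  induction k with
  | zero => intro lo; rfl
  | succ k ih =>
    intro lo
    rw [List.range_succ_eq_map]
    simp only [List.map_cons, List.map_map]
    rw [minList]
    congr 1
    · simp
    · rw [← ih (lo + inc)]
      refine List.map_congr_left (fun j _ => ?_)
      simp only [Function.comp_apply]
      push_cast
      ring

-- ===== VERDICT (by name: the statement is the Claim_ definition above) =====
theorem enumerateIncreaseSequence_spec : Claim_equal_enumerateIncreaseSequence := by
  intro n minNum maxNum leastInc _
  unfold Spec_enumerateIncreaseSequence enumerateIncreaseSequence enumerateIncreaseSequence_alt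
  split
  · rfl
  · rename_i hguard
    push Not at hguard
    obtain ⟨hn0, hmm, hfe⟩ := hguard
    set inc := if leastInc < 0 then 0 else leastInc with hincdef
    have hincmax : inc = max leastInc 0 := by rw [hincdef]; split <;> omega
    have hinc0 : 0 ≤ inc := by rw [hincdef]; split <;> omega
    set k := n.toNat with hkdef
    have hk : (k : Int) = n := Int.toNat_of_nonneg (by omega)
    have hk1 : 1 ≤ k := by omega
    have hfeas : minNum ≤ maxNum - inc * ((k : Int) - 1) := by
      rw [hk]
      rw [hincdef]
      split
      · rename_i hneg
        have : 0 ≤ (0 : Int) * (n - 1) := by simp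
        nlinarith [hmm, hn0]
      · rename_i hnneg
        have e : leastInc * (n - 1) = (n - 1) * leastInc := by ring
        nlinarith [hfe]
    have hinit : (PySem.List.pyRange 0 n 1).map (fun i => minNum + i * inc)
        = minList inc k minNum := by
      rw [PySem.List.pyRange_one]
      rw [List.map_map]
      rw [← minList_eq_map_range inc k minNum]
      have hkk : (n - 0).toNat = k := by omega
      rw [hkk]
      refine List.map_congr_left (fun j _ => ?_)
      simp only [Function.comp_apply]
      ring
    show aLoop inc maxNum (maxNum - (n - 1) * inc) n (((maxNum - minNum + 1).toNat + 1) ^ k)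
        ((PySem.List.pyRange 0 n 1).map (fun i => minNum + i * inc)) []
      = bRec maxNum (max leastInc 0) k minNum
    rw [hinit]
    set B := (maxNum - minNum + 1).toNat + 1 with hBdef
    have hBge : maxNum - inc * ((k : Int) - 1) - minNum < (B : Int) := by
      have hmul : 0 ≤ inc * ((k : Int) - 1) := mul_nonneg hinc0 (by omega)
      have hsel : (maxNum - minNum + 1 : Int) ≤ ((maxNum - minNum + 1).toNat : Int) :=
        Int.self_le_toNat _
      rw [hBdef]
      push_cast
      linarith [hmul, hsel]
    have := aLoop_eq maxNum inc (maxNum - (n - 1) * inc) n B (B ^ k)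
      (minList inc k minNum) [] minNum
      (by rw [minList_length]; omega)
      (bnd_minList maxNum inc k minNum hfeas)
      (by rw [minList_length]; exact hBge)
      (by
        have := mu_lt maxNum inc B (minList inc k minNum) minNum
          (bnd_minList maxNum inc k minNum hfeas) (by rw [minList_length]; exact hBge)
        rwa [minList_length] at this)
      rfl
      (by rw [minList_length, hk])
    rw [this, EE_minList maxNum inc k minNum hfeas, hincmax]
    simp
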